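-- pv_equiv track=rewrite | github.com/LGKAI/DataStructures-Algorithms | Practice/Lab1_Review/Exercise_1.py | find_longest_ascending_sublist
-- ===== SOURCE A (Python) =====
-- def find_longest_ascending_sublist(arr: list) -> list:
--     if not arr:
--         return []
--
--     longest = []
--     cur = [arr[0]]
--
--     for i in range(1, len(arr)):
--         if arr[i] > arr[i - 1]:
--             cur.append(arr[i])
--         else:
--             if len(cur) > len(longest):
--                 longest = cur
--             cur = [arr[i]]
--
--     if len(cur) > len(longest):
--         longest = cur
--
--     return longest
-- ===== SOURCE B (Python) =====
-- def find_longest_ascending_sublist(arr: list) -> list: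
--     # Materialise all maximal strictly-ascending runs, then select the first longest.
--     runs = []
--     for x in arr:
--         if runs and runs[-1][-1] < x:
--             runs[-1].append(x)
--         else:
--             runs.append([x])
--     best = []
--     for r in runs:
--         if len(r) > len(best):
--             best = r
--     return best
-- ===== Notes on version B (the rewrite author's own statement) =====
-- stated objective: alternative
-- what changed: Instead of one pass that keeps only the current run and the best-so-far, B first partitions the list into the explicit list of all maximal strictly-ascending runs and then selects the first longest run in a separate pass.
import Mathlib
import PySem

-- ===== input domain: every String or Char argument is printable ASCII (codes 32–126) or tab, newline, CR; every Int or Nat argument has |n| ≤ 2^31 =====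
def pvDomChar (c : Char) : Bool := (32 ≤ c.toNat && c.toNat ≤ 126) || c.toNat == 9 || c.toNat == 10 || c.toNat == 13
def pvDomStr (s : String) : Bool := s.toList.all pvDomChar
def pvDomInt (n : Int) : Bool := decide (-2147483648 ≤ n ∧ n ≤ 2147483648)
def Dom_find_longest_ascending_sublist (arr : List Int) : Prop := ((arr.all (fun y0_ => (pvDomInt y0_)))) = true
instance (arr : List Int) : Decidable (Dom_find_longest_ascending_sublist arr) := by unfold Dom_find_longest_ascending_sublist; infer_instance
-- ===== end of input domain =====

-- B builds the explicit list of maximal strictly-ascending runs and then selects the first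
-- longest one in a second pass (alternative decomposition; same return value as A).

-- ===== PORT A =====
-- A's loop over i in range(1, len(arr)): ported as structural recursion over the tail,
-- carrying prev = arr[i-1] together with the (longest, cur) state.
def pvGoA : List Int → List Int → List Int → Int → List Int × List Int
  | [], longest, cur, _ => (longest, cur)
  | x :: xs, longest, cur, prev =>
    if x > prev then pvGoA xs longest (cur ++ [x]) x
    else pvGoA xs (if cur.length > longest.length then cur else longest) [x] x

def find_longest_ascending_sublist (arr : List Int) : List Int :=
  match arr with
  | [] => []
  | a :: rest =>
    let (longest, cur) := pvGoA rest [] [a] a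
    if cur.length > longest.length then cur else longest

-- ===== PORT B =====
-- first loop of Source B: append x to the last run or start a new run
def pvStepB (runs : List (List Int)) (x : Int) : List (List Int) :=
  match runs.getLast? with
  | some r => if r.getLast! < x then runs.dropLast ++ [r ++ [x]] else runs ++ [[x]]
  | none => runs ++ [[x]]

def find_longest_ascending_sublist_alt (arr : List Int) : List Int :=
  let runs := arr.foldl pvStepB []
  runs.foldl (fun best r => if r.length > best.length then r else best) []

-- ===== PRECONDITION & SPEC =====
def Spec_find_longest_ascending_sublist (arr : List Int) (out : List Int) : Prop := out = find_longest_ascending_sublist_alt arr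
instance (arr : List Int) (out : List Int) : Decidable (Spec_find_longest_ascending_sublist arr out) := by unfold Spec_find_longest_ascending_sublist; infer_instance

-- ===== CLAIM (what is proved, stated in full; the proofs are below) =====
def Claim_equal_find_longest_ascending_sublist : Prop := ∀ (arr : List Int), Dom_find_longest_ascending_sublist arr → Spec_find_longest_ascending_sublist arr (find_longest_ascending_sublist arr)

-- ===== LEMMAS AND PROOFS =====

-- the selection fold of B (second loop)
def pvSel (init : List Int) (rs : List (List Int)) : List Int :=
  rs.foldl (fun best r => if r.length > best.length then r else best) init

-- abstract list of maximal runs, starting from a current run `cur` whose last element is `prev`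
def pvRunsF : List Int → Int → List Int → List (List Int)
  | cur, _, [] => [cur]
  | cur, prev, x :: xs =>
    if x > prev then pvRunsF (cur ++ [x]) x xs
    else cur :: pvRunsF [x] x xs

theorem pvSel_cons (init r : List Int) (rs : List (List Int)) :
    pvSel init (r :: rs) = pvSel (if r.length > init.length then r else init) rs := rfl

-- A's loop computes the strict-> selection over the run list
theorem pvGoA_sel (rest : List Int) : ∀ (longest cur : List Int) (prev : Int),
    (let (l, c) := pvGoA rest longest cur prev;
     if c.length > l.length then c else l) = pvSel longest (pvRunsF cur prev rest) := by
  induction rest with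
  | nil =>
    intro longest cur prev
    simp [pvGoA, pvRunsF, pvSel]
  | cons x xs ih =>
    intro longest cur prev
    by_cases h : x > prev
    · simp only [pvGoA, pvRunsF, if_pos h]
      exact ih longest (cur ++ [x]) x
    · simp only [pvGoA, pvRunsF, if_neg h, pvSel_cons]
      exact ih _ [x] x

-- B's building loop, run on a state ending with a nonempty current run, produces the same run list
theorem pvFoldB_runs (rest : List Int) : ∀ (rs : List (List Int)) (cur : List Int) (prev : Int),
    cur.getLast? = some prev →
    List.foldl pvStepB (rs ++ [cur]) rest = rs ++ pvRunsF cur prev rest := by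
  induction rest with
  | nil =>
    intro rs cur prev _
    simp [pvRunsF]
  | cons x xs ih =>
    intro rs cur prev hlast
    have hget : (rs ++ [cur]).getLast? = some cur := by simp
    by_cases h : prev < x
    · have : pvStepB (rs ++ [cur]) x = rs ++ [cur ++ [x]] := by
        simp [pvStepB, hget, hlast, h]
      rw [List.foldl_cons, this, ih rs (cur ++ [x]) x (by simp)]
      simp [pvRunsF, h]
    · have : pvStepB (rs ++ [cur]) x = (rs ++ [cur]) ++ [[x]] := by
        simp [pvStepB, hget, hlast, h]
      rw [List.foldl_cons, this, ih (rs ++ [cur]) [x] x (by simp)]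
      simp [pvRunsF, h]

theorem pvAlt_sel (arr : List Int) :
    find_longest_ascending_sublist_alt arr =
      match arr with
      | [] => []
      | a :: rest => pvSel [] (pvRunsF [a] a rest) := by
  cases arr with
  | nil => simp [find_longest_ascending_sublist_alt]
  | cons a rest =>
    have h1 : List.foldl pvStepB [] (a :: rest) = pvRunsF [a] a rest := by
      have : pvStepB ([] : List (List Int)) a = [] ++ [[a]] := by simp [pvStepB]
      rw [List.foldl_cons, this,
        pvFoldB_runs rest [] [a] a (by simp)]
      simp
    simp only [find_longest_ascending_sublist_alt, h1]
    rfl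

-- ===== VERDICT (by name: the statement is the Claim_ definition above) =====
theorem find_longest_ascending_sublist_spec : Claim_equal_find_longest_ascending_sublist := by
  intro arr _
  unfold Spec_find_longest_ascending_sublist
  rw [pvAlt_sel]
  cases arr with
  | nil => rfl
  | cons a rest =>
    exact pvGoA_sel rest [] [a] a
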